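-- pv_equiv track=rewrite | github.com/sanjeevs/puzzles | dice_rl.py | run_len_histogram
-- ===== SOURCE A (Python) =====
-- from collections import Counter
--
-- def run_len_histogram(samples):
--     '''
--         Counts the different run length.
--         Includes the hit also in the run length count.
--     '''
--     histogram = Counter()
--     rl_cnt = 0
--
--     for s in samples:
--         rl_cnt += 1
--         if s:
--             histogram[rl_cnt] += 1
--             rl_cnt = 0
--     return histogram
-- ===== SOURCE B (Python) =====
-- from collections import Counter
--
-- def run_len_histogram(samples):
--     positions = [i for i, s in enumerate(samples) if s]
--     gaps = []
--     prev = -1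
--     for i in positions:
--         gaps.append(i - prev)
--         prev = i
--     return Counter(gaps)
-- ===== Notes on version B (the rewrite author's own statement) =====
-- stated objective: alternative
-- what changed: Replaces the interleaved counter-reset loop by an index-gathering pass (enumerate+filter), a differencing pass over the truthy positions with virtual previous index -1, and a final Counter over the gap list.
import Mathlib
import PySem

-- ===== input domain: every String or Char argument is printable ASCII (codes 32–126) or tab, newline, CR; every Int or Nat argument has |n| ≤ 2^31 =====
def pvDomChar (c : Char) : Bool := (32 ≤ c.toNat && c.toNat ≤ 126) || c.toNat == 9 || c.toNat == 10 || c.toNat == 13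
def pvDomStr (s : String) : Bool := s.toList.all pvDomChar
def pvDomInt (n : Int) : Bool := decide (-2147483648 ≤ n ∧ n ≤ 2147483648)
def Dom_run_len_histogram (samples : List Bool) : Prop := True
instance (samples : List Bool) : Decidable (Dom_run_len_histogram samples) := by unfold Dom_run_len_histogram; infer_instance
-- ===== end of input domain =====

-- B gathers truthy indices, differences them against a virtual previous index -1, and Counters the gaps,
-- instead of A's single counter-reset loop; same O(n) cost, different decomposition.

-- ===== PORT A =====
-- single pass: run-length counter incremented per sample, Counter bumped and counter reset on a truthy sample
def run_len_histogram (samples : List Bool) : List (Int × Int) :=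
  (samples.foldl
    (fun (st : PySem.Dict Int Int × Int) s =>
      let rl_cnt := st.2 + 1
      if s then (st.1.modify rl_cnt 0 (· + 1), 0) else (st.1, rl_cnt))
    (PySem.Dict.empty, 0)).1.items

-- ===== PORT B =====
-- pass 1: positions of truthy samples; pass 2: consecutive differences with prev = -1; then Counter(gaps)
def run_len_histogram_alt (samples : List Bool) : List (Int × Int) :=
  let positions := ((PySem.List.enumerate samples 0).filter (fun p => p.2)).map (fun p => p.1)
  let gp := positions.foldl (fun (st : List Int × Int) i => (st.1 ++ [i - st.2], i)) ([], -1)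
  (PySem.Dict.counter gp.1).items

-- ===== PRECONDITION & SPEC =====
def Spec_run_len_histogram (samples : List Bool) (out : List (Int × Int)) : Prop := out = run_len_histogram_alt samples
instance (samples : List Bool) (out : List (Int × Int)) : Decidable (Spec_run_len_histogram samples out) := by unfold Spec_run_len_histogram; infer_instance

-- ===== CLAIM (what is proved, stated in full; the proofs are below) =====
def Claim_equal_run_len_histogram : Prop := ∀ (samples : List Bool), Dom_run_len_histogram samples → Spec_run_len_histogram samples (run_len_histogram samples)

-- ===== LEMMAS AND PROOFS =====

-- the run lengths of `samples` when the current run already holds `c` samples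
def pvGaps (samples : List Bool) (c : Int) : List Int :=
  match samples with
  | [] => []
  | s :: t => if s then (c + 1) :: pvGaps t 0 else pvGaps t (c + 1)

-- A's loop is the modify-counting fold over pvGaps
theorem pvA_eq_counterFold (samples : List Bool) (d : PySem.Dict Int Int) (c : Int) :
    (samples.foldl
      (fun (st : PySem.Dict Int Int × Int) s =>
        let rl_cnt := st.2 + 1
        if s then (st.1.modify rl_cnt 0 (· + 1), 0) else (st.1, rl_cnt))
      (d, c)).1
    = (pvGaps samples c).foldl (fun d x => d.modify x 0 (· + 1)) d := by
  induction samples generalizing d c with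
  | nil => simp [pvGaps]
  | cons s t ih =>
    cases s <;> simp [pvGaps, List.foldl, ih]

-- B's differencing pass over the truthy positions produces pvGaps
theorem pvB_gaps (samples : List Bool) (k c : Int) (acc : List Int) :
    ((((PySem.List.enumerate samples k).filter (fun p => p.2)).map (fun p => p.1)).foldl
       (fun (st : List Int × Int) i => (st.1 ++ [i - st.2], i)) (acc, k - c - 1)).1
    = acc ++ pvGaps samples c := by
  induction samples generalizing k c acc with
  | nil => simp [PySem.List.enumerate, pvGaps]
  | cons s t ih =>
    cases s with
    | false =>
      rw [PySem.List.enumerate_cons]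
      simp only [List.filter, pvGaps]
      have h : k + 1 - (c + 1) - 1 = k - c - 1 := by ring
      simpa [pvGaps] using h ▸ ih (k + 1) (c + 1) acc
    | true =>
      rw [PySem.List.enumerate_cons]
      have h1 : k - (k - c - 1) = c + 1 := by ring
      simp only [List.filter_cons_of_pos, List.map_cons, List.foldl_cons, h1]
      have := ih (k + 1) 0 (acc ++ [c + 1])
      norm_num at this
      simpa [pvGaps] using this

-- ===== VERDICT (by name: the statement is the Claim_ definition above) =====
theorem run_len_histogram_spec : Claim_equal_run_len_histogram := by
  intro samples _
  unfold Spec_run_len_histogram run_len_histogram run_len_histogram_alt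
  simp only [pvA_eq_counterFold, ← PySem.Dict.counter_eq_foldl]
  have := pvB_gaps samples 0 0 []
  norm_num at this
  rw [this]
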